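-- pv_equiv track=rewrite | github.com/appletail/algorithm | 데일리 과제/algorithm/22.08.09_Flatten.py | maxidx
-- ===== SOURCE A (Python) =====
-- def maxidx(lst):
--     result = lst[0]
--     cnt = 0
--     for j in lst:
--         if j >= result:
--             idx = cnt
--             result = j
--         cnt += 1
--
--     return idx
-- ===== SOURCE B (Python) =====
-- def maxidx(lst):
--     m = lst[0]
--     for v in lst:
--         if v > m:
--             m = v
--     idx = 0
--     for i, v in enumerate(lst):
--         if v == m:
--             idx = i
--     return idx
-- ===== Notes on version B (the rewrite author's own statement) =====
-- stated objective: simpler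
-- what changed: Replaced the fused single scan carrying (result, idx, cnt) by two plain passes: one computing the maximum, one finding its last index via enumerate.
import Mathlib
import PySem

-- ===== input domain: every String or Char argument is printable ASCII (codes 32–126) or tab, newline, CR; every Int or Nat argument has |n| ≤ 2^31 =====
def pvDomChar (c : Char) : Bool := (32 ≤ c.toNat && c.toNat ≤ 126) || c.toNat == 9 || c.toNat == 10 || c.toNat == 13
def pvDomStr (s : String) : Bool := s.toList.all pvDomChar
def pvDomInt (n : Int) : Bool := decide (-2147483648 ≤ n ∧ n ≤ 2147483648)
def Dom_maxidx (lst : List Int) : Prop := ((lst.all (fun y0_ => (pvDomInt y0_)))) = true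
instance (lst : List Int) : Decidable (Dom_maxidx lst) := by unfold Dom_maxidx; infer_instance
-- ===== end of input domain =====

-- B replaces A's fused scan (result, idx, cnt carried together) by two plain passes:
-- compute the maximum, then find its last index; objective: simpler.

-- ===== PORT A =====
-- A's fused loop: state (result, idx, cnt); 'idx' starts unassigned in Python but the
-- first iteration always sets it (the head is >= itself), so the initial 0 is never returned.
def maxidx (lst : List Int) : Int :=
  match PySem.List.pyGet? lst 0 with
  | none => 0  -- indexing the head of an empty list raises IndexError; excluded by Pre_maxidx
  | some r0 =>
    (lst.foldl
      (fun (st : Int × Int × Int) j =>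
        if j ≥ st.1 then (j, st.2.2, st.2.2 + 1) else (st.1, st.2.1, st.2.2 + 1))
      (r0, 0, 0)).2.1

-- ===== PORT B =====
def maxidx_alt (lst : List Int) : Int :=
  match PySem.List.pyGet? lst 0 with
  | none => 0  -- indexing the head of an empty list raises IndexError; excluded by Pre_maxidx
  | some m0 =>
    let m := lst.foldl (fun m v => if v > m then v else m) m0
    (PySem.List.enumerate lst).foldl
      (fun (idx : Int) (p : Int × Int) => if p.2 = m then p.1 else idx) 0

-- ===== PRECONDITION & SPEC =====
-- Pre_ excludes only the empty list, on which both A and B raise IndexError reading the head.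
def Pre_maxidx (lst : List Int) : Prop := lst ≠ []
instance (lst : List Int) : Decidable (Pre_maxidx lst) := by unfold Pre_maxidx; infer_instance
def pvWitness_maxidx : List Int := ([3, 1, 3, 2])

def Spec_maxidx (lst : List Int) (out : Int) : Prop := out = maxidx_alt lst
instance (lst : List Int) (out : Int) : Decidable (Spec_maxidx lst out) := by unfold Spec_maxidx; infer_instance

-- ===== CLAIM (what is proved, stated in full; the proofs are below) =====
def Claim_equal_maxidx : Prop := ∀ (lst : List Int), Dom_maxidx lst → Pre_maxidx lst → Spec_maxidx lst (maxidx lst)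

-- ===== LEMMAS AND PROOFS =====

-- running maximum (the shape both ports' first pass uses)
def pvFmax (xs : List Int) (r : Int) : Int :=
  xs.foldl (fun m v => if v > m then v else m) r

-- last index (offset by c) of an element equal to M, default i
def pvLastAcc (xs : List Int) (M : Int) (c i : Int) : Int :=
  match xs with
  | [] => i
  | x :: t => pvLastAcc t M (c + 1) (if x = M then c else i)

theorem pvFmax_cons (x : Int) (t : List Int) (r : Int) :
    pvFmax (x :: t) r = pvFmax t (if x > r then x else r) := rfl

theorem pvFmax_ge (xs : List Int) : ∀ r : Int, r ≤ pvFmax xs r := by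
  induction xs with
  | nil => intro r; simp [pvFmax]
  | cons x t ih =>
    intro r
    rw [pvFmax_cons]
    split_ifs with h
    · exact le_trans (le_of_lt h) (ih x)
    · exact ih r

theorem pvFmax_mem_or (xs : List Int) : ∀ r : Int, pvFmax xs r ∈ xs ∨ pvFmax xs r = r := by
  induction xs with
  | nil => intro r; simp [pvFmax]
  | cons x t ih =>
    intro r
    rw [pvFmax_cons]
    split_ifs with h
    · rcases ih x with h1 | h1
      · exact Or.inl (List.mem_cons_of_mem _ h1)
      · rw [h1]; exact Or.inl List.mem_cons_self
    · rcases ih r with h1 | h1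
      · exact Or.inl (List.mem_cons_of_mem _ h1)
      · exact Or.inr h1

-- B's second pass over enumerate is pvLastAcc
theorem pvEnum_foldl (M : Int) (xs : List Int) :
    ∀ (c i : Int),
      (PySem.List.enumerate xs c).foldl
        (fun (idx : Int) (p : Int × Int) => if p.2 = M then p.1 else idx) i
      = pvLastAcc xs M c i := by
  induction xs with
  | nil => intro c i; simp [PySem.List.enumerate_nil, pvLastAcc]
  | cons x t ih =>
    intro c i
    rw [PySem.List.enumerate_cons]
    simp only [List.foldl_cons]
    rw [ih]
    rfl

-- A's fused loop computes the last index of the running maximum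
theorem pvKey (xs : List Int) :
    ∀ (r c i i' : Int), (pvFmax xs r ∉ xs → i = i') →
      ((xs.foldl
          (fun (st : Int × Int × Int) j =>
            if j ≥ st.1 then (j, st.2.2, st.2.2 + 1) else (st.1, st.2.1, st.2.2 + 1))
          (r, i, c)).2.1)
        = pvLastAcc xs (pvFmax xs r) c i' := by
  induction xs with
  | nil =>
    intro r c i i' h
    simp [pvFmax, pvLastAcc] at *
    exact h
  | cons x t ih =>
    intro r c i i' h
    rw [pvFmax_cons]
    simp only [List.foldl_cons]
    by_cases hx : x ≥ r
    · have hr' : (if x > r then x else r) = x := by split_ifs with h1 <;> omega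
      rw [hr']
      simp only [hx, if_pos]
      show ((t.foldl _ (x, c, c + 1)).2.1) = pvLastAcc (x :: t) (pvFmax t x) c i'
      show _ = pvLastAcc t (pvFmax t x) (c + 1) (if x = pvFmax t x then c else i')
      apply ih
      intro hnot
      rcases pvFmax_mem_or t x with hmem | heq
      · exact absurd hmem hnot
      · simp [heq]
    · have hr' : (if x > r then x else r) = r := by split_ifs with h1 <;> omega
      rw [hr']
      simp only [if_neg hx]
      rw [pvFmax_cons, hr'] at h
      have hM : r ≤ pvFmax t r := pvFmax_ge t r
      have hxM : x ≠ pvFmax t r := by omega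
      show ((t.foldl _ (r, i, c + 1)).2.1) = pvLastAcc (x :: t) (pvFmax t r) c i'
      show _ = pvLastAcc t (pvFmax t r) (c + 1) (if x = pvFmax t r then c else i')
      rw [if_neg hxM]
      apply ih
      intro hnot
      apply h
      intro hmem
      rcases List.mem_cons.mp hmem with h1 | h1
      · exact hxM h1.symm
      · exact hnot h1

theorem pvGet0 (h : Int) (t : List Int) : PySem.List.pyGet? (h :: t) 0 = some h := by
  simp [PySem.List.pyGet?, PySem.List.pyIdx?]

-- ===== VERDICT (by name: the statement is the Claim_ definition above) =====
theorem maxidx_spec : Claim_equal_maxidx := by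
  intro lst _ hpre
  unfold Spec_maxidx
  match lst with
  | [] => exact absurd rfl hpre
  | h :: t =>
    unfold maxidx maxidx_alt
    rw [pvGet0]
    simp only
    rw [pvEnum_foldl]
    exact pvKey (h :: t) h 0 0 0 (fun _ => rfl)
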